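-- pv_equiv track=rewrite | github.com/Checkmk/checkmk | cmk/plugins/collection/agent_based/heartbeat_crm.py | heartbeat_crm_parse_failed_resource_actions
-- ===== SOURCE A (Python) =====
-- from collections.abc import Iterable, Mapping, Sequence
--
-- def heartbeat_crm_parse_failed_resource_actions(
--     failed_resource_actions_section: Iterable[Sequence[str]],
-- ) -> Sequence[str]:
--     """Join lines on space and ignore punctuations/extra spaces.
--
--     Examples:
--
--         >>> heartbeat_crm_parse_failed_resource_actions((l for l in [["*", "1", "2"], ["_", "3"]]))
--         ['1 2 3']
--
--         >>> heartbeat_crm_parse_failed_resource_actions((l for l in [["*", "1", "2"], ["_", "3"], ["_", "4"], ["*", "1", "2"], ["_", "3"]]))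
--         ['1 2 3 4', '1 2 3']
--
--         >>> heartbeat_crm_parse_failed_resource_actions((l for l in [["1", "2", "3"], ["1", "2", "3"], ["*", "1"], ["_", "2", "3"]]))
--         ['1 2 3', '1 2 3', '1 2 3']
--
--         >>> heartbeat_crm_parse_failed_resource_actions((l for l in [["1", "2",], [" ", "3"]]))
--         ['1 2 3']
--
--         >>> heartbeat_crm_parse_failed_resource_actions((l for l in []))
--         []
--
--     """
--     joined = []
--     line = ""
--     for part_list in failed_resource_actions_section:
--         part = " ".join(part_list)
--         if part.startswith("*"):
--             if line:
--                 joined.append(line)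
--             line = part[2:]
--         elif part.startswith(("_ ", "  ")):
--             line += part[1:]
--         else:
--             if line:
--                 joined.append(line)
--             line = part
--
--     if line:
--         joined.append(line)
--     return joined
-- ===== SOURCE B (Python) =====
-- def heartbeat_crm_parse_failed_resource_actions(failed_resource_actions_section):
--     # Pass 1: cut the lines into groups: a non-continuation line starts a new
--     # group; continuation lines ('_ '/'  ' prefix) attach to the current group.
--     groups = [(None, [])]
--     for part_list in failed_resource_actions_section:
--         part = " ".join(part_list)
--         if part.startswith(("_ ", "  ")):
--             groups[-1][1].append(part)
--         else:
--             groups.append((part, []))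
--     # Pass 2: format each group into one string; keep the non-empty ones.
--     result = []
--     for head, conts in groups:
--         if head is None:
--             s = ""
--         elif head.startswith("*"):
--             s = head[2:]
--         else:
--             s = head
--         s += "".join(c[1:] for c in conts)
--         if s:
--             result.append(s)
--     return result
-- ===== Notes on version B (the rewrite author's own statement) =====
-- stated objective: alternative
-- what changed: Replaces A's single fused loop with mutable flush-on-boundary state by a two-phase pipeline: one pass cutting the lines into groups (start line + its continuations), then one pass formatting each group into a string and keeping the non-empty ones.
import Mathlib
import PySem

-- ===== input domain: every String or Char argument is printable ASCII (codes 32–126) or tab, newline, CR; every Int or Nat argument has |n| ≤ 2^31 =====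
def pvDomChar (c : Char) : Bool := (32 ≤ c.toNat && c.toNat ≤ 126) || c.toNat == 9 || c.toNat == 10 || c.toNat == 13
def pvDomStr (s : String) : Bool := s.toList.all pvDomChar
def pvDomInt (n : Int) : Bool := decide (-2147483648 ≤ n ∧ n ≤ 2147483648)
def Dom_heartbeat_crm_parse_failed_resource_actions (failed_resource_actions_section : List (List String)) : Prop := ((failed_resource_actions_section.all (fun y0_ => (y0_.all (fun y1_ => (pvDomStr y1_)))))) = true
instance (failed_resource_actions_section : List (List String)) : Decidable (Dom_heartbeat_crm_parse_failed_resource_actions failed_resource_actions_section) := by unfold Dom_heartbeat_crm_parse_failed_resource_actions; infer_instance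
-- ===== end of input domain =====

-- B replaces A's single fused loop (mutable `line` flushed at each boundary) by a two-phase
-- pipeline: cut the lines into groups, then format each group; same cost, different decomposition.

-- ===== PORT A =====
-- A's loop body: state (joined, line); line kept as List Char (Python str at code-point level).
def pvStepA (st : List String × List Char) (part_list : List String) : List String × List Char :=
  let part := (PySem.Str.join " " part_list).toList
  if PySem.Chars.startswith part ['*'] then
    ((if st.2 ≠ [] then st.1 ++ [String.ofList st.2] else st.1), PySem.Chars.slice part (some 2) none)
  else if (PySem.Chars.startswith part ['_', ' '] || PySem.Chars.startswith part [' ', ' ']) then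
    (st.1, st.2 ++ PySem.Chars.slice part (some 1) none)
  else
    ((if st.2 ≠ [] then st.1 ++ [String.ofList st.2] else st.1), part)

def heartbeat_crm_parse_failed_resource_actions (failed_resource_actions_section : List (List String)) : List String :=
  let r := failed_resource_actions_section.foldl pvStepA ([], [])
  if r.2 ≠ [] then r.1 ++ [String.ofList r.2] else r.1

-- ===== PORT B =====
-- a group: optional start line (none = the leading pre-group) and its continuation lines
def pvFmt (g : Option (List Char) × List (List Char)) : List Char :=
  (match g.1 with
   | none => []
   | some h => if PySem.Chars.startswith h ['*'] then PySem.Chars.slice h (some 2) none else h)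
  ++ PySem.Chars.join [] (g.2.map (fun c => PySem.Chars.slice c (some 1) none))

-- pass 1 loop body; Python appends groups at the end, ported with the list reversed (head = current group)
def pvStepB (gs : List (Option (List Char) × List (List Char))) (part_list : List String) :
    List (Option (List Char) × List (List Char)) :=
  let part := (PySem.Str.join " " part_list).toList
  if (PySem.Chars.startswith part ['_', ' '] || PySem.Chars.startswith part [' ', ' ']) then
    match gs with
    | g :: rest => (g.1, g.2 ++ [part]) :: rest
    | [] => []
  else (some part, []) :: gs

-- pass 2: format each group, keep the non-empty ones
def pvPass2 (groups : List (Option (List Char) × List (List Char))) : List String :=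
  groups.foldl (fun acc g => if pvFmt g ≠ [] then acc ++ [String.ofList (pvFmt g)] else acc) []

def heartbeat_crm_parse_failed_resource_actions_alt (failed_resource_actions_section : List (List String)) : List String :=
  pvPass2 ((failed_resource_actions_section.foldl pvStepB [(none, [])]).reverse)

-- ===== PRECONDITION & SPEC =====
def Spec_heartbeat_crm_parse_failed_resource_actions (failed_resource_actions_section : List (List String)) (out : List String) : Prop := out = heartbeat_crm_parse_failed_resource_actions_alt failed_resource_actions_section
instance (failed_resource_actions_section : List (List String)) (out : List String) : Decidable (Spec_heartbeat_crm_parse_failed_resource_actions failed_resource_actions_section out) := by unfold Spec_heartbeat_crm_parse_failed_resource_actions; infer_instance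

-- ===== CLAIM (what is proved, stated in full; the proofs are below) =====
def Claim_equal_heartbeat_crm_parse_failed_resource_actions : Prop := ∀ (failed_resource_actions_section : List (List String)), Dom_heartbeat_crm_parse_failed_resource_actions failed_resource_actions_section → Spec_heartbeat_crm_parse_failed_resource_actions failed_resource_actions_section (heartbeat_crm_parse_failed_resource_actions failed_resource_actions_section)

-- ===== LEMMAS AND PROOFS =====
def pvFlush (r : List String × List Char) : List String :=
  if r.2 ≠ [] then r.1 ++ [String.ofList r.2] else r.1

lemma pvJoinNil (l : List (List Char)) : PySem.Chars.join [] l = l.flatten := by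
  induction l with
  | nil => simp [PySem.Chars.join_nil]
  | cons a t ih =>
    cases t with
    | nil => simp [PySem.Chars.join_singleton]
    | cons b u => simp [PySem.Chars.join_cons_cons] at *; simp [ih]

lemma pvFmt_append (h : Option (List Char)) (cs : List (List Char)) (p : List Char) :
    pvFmt (h, cs ++ [p]) = pvFmt (h, cs) ++ PySem.Chars.slice p (some 1) none := by
  simp [pvFmt, pvJoinNil]

lemma pvNotStar (l : List Char)
    (hc : (PySem.Chars.startswith l ['_', ' '] || PySem.Chars.startswith l [' ', ' ']) = true) :
    PySem.Chars.startswith l ['*'] = false := by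
  simp [PySem.Chars.startswith_iff, List.IsPrefix] at hc
  rcases hc with ⟨t, rfl⟩ | ⟨t, rfl⟩ <;> simp [PySem.Chars.startswith, List.isPrefixOf]

lemma pvPass2_append (l : List (Option (List Char) × List (List Char))) (g) :
    pvPass2 (l ++ [g]) = if pvFmt g ≠ [] then pvPass2 l ++ [String.ofList (pvFmt g)] else pvPass2 l := by
  simp [pvPass2, List.foldl_append]

lemma pvKey (sec : List (List String)) :
    ∀ (h : Option (List Char)) (cs : List (List Char))
      (rest : List (Option (List Char) × List (List Char))),
    pvFlush (sec.foldl pvStepA (pvPass2 rest.reverse, pvFmt (h, cs)))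
      = pvPass2 ((sec.foldl pvStepB ((h, cs) :: rest)).reverse) := by
  induction sec with
  | nil =>
    intro h cs rest
    simp only [List.foldl_nil, List.reverse_cons, pvPass2_append, pvFlush]
  | cons p t ih =>
    intro h cs rest
    rw [List.foldl_cons, List.foldl_cons]
    by_cases hc : (PySem.Chars.startswith (PySem.Str.join " " p).toList ['_', ' ']
        || PySem.Chars.startswith (PySem.Str.join " " p).toList [' ', ' ']) = true
    · have hA : pvStepA (pvPass2 rest.reverse, pvFmt (h, cs)) p
          = (pvPass2 rest.reverse, pvFmt (h, cs ++ [(PySem.Str.join " " p).toList])) := by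
        simp only [pvStepA]
        rw [pvNotStar _ hc, hc]
        simp [pvFmt_append]
      have hB : pvStepB ((h, cs) :: rest) p = (h, cs ++ [(PySem.Str.join " " p).toList]) :: rest := by
        simp only [pvStepB]
        rw [hc]
        simp
      rw [hA, hB]
      exact ih _ _ _
    · simp only [Bool.not_eq_true] at hc
      have hA : pvStepA (pvPass2 rest.reverse, pvFmt (h, cs)) p
          = (pvPass2 (((h, cs) :: rest).reverse), pvFmt (some (PySem.Str.join " " p).toList, [])) := by
        simp only [pvStepA]
        rw [hc]
        by_cases hs : PySem.Chars.startswith (PySem.Str.join " " p).toList ['*'] = true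
        · rw [hs]
          simp at hs
          simp [pvFmt, PySem.Chars.join_nil, List.reverse_cons, pvPass2_append, hs]
        · simp only [Bool.not_eq_true] at hs
          rw [hs]
          simp at hs
          simp [pvFmt, PySem.Chars.join_nil, List.reverse_cons, pvPass2_append, hs]
      have hB : pvStepB ((h, cs) :: rest) p
          = (some (PySem.Str.join " " p).toList, []) :: (h, cs) :: rest := by
        simp only [pvStepB]
        rw [hc]
        simp
      rw [hA, hB]
      exact ih _ _ _

-- ===== VERDICT (by name: the statement is the Claim_ definition above) =====
theorem heartbeat_crm_parse_failed_resource_actions_spec : Claim_equal_heartbeat_crm_parse_failed_resource_actions := by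
  intro sec _dom
  unfold Spec_heartbeat_crm_parse_failed_resource_actions
  have := pvKey sec none [] []
  simpa [pvFlush, pvPass2, pvFmt, PySem.Chars.join_nil,
    heartbeat_crm_parse_failed_resource_actions,
    heartbeat_crm_parse_failed_resource_actions_alt] using this
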